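-- pv_equiv track=rewrite | github.com/gil390/pylibgraph | pylibgraph.py | link_symbols
-- ===== SOURCE A (Python) =====
-- def link_symbols(main_dic, objdic_vector):
--   # links symbol from main_dic to object file vector
--   link = {}
--   for symbol_name in main_dic:
--
--     link[symbol_name] = []
--     size = main_dic[symbol_name]
--
--     for objdic in objdic_vector:
--       if symbol_name in list(objdic.keys()):
--         size2 = objdic[symbol_name][0]
--         if size == size2:
--           link[symbol_name].append(objdic[symbol_name][1])
--   return link
-- ===== SOURCE B (Python) =====
-- def link_symbols(main_dic, objdic_vector):
--     # One pass over objdic_vector builds an index name -> list of entry lists,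
--     # then each symbol's links are read off by a single lookup.
--     index = {}
--     for objdic in objdic_vector:
--         for name, val in objdic.items():
--             if name in main_dic:
--                 index.setdefault(name, []).append(val)
--     return {name: [val[1] for val in index.get(name, []) if val[0] == size]
--             for name, size in main_dic.items()}
-- ===== Notes on version B (the rewrite author's own statement) =====
-- stated objective: faster
-- what changed: B builds a name->entries index in one pass over objdic_vector and then answers each symbol with a single dictionary lookup, instead of rescanning every object dict (rebuilding list(objdic.keys()) each time) once per symbol.
import Mathlib
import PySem

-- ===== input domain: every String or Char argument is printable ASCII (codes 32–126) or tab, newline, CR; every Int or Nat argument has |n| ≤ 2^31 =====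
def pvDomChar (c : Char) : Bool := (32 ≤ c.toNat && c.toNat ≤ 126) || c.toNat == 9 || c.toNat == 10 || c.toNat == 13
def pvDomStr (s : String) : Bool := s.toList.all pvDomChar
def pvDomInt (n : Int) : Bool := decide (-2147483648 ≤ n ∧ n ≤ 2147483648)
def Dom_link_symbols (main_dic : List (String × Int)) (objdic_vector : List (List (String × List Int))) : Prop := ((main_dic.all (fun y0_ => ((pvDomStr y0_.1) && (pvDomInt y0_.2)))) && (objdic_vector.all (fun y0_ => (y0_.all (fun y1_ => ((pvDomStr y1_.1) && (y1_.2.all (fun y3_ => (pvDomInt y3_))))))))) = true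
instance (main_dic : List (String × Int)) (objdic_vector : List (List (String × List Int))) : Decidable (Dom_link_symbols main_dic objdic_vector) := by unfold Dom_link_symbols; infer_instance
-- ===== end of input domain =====

-- B replaces A's per-symbol rescans of every object dict by one index-building pass plus per-symbol lookups (measurably faster).


-- ===== PORT A =====
-- The dict arguments arrive as association lists; PySem.Dict.ofList is the Python dict they denote.
def link_symbols (main_dic : List (String × Int)) (objdic_vector : List (List (String × List Int))) : List (String × List Int) :=
  -- link = {}; for symbol_name in main_dic: link[symbol_name] = []; … (each key occurs once, so
  -- the result dict is the key-ordered list of (symbol_name, collected links))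
  (PySem.Dict.ofList main_dic).items.foldl (fun link p =>
    link ++ [(p.1,
      -- for objdic in objdic_vector: if symbol_name in list(objdic.keys()): …
      objdic_vector.foldl (fun acc objdic =>
        let O := PySem.Dict.ofList objdic
        if O.contains p.1 then
          let lst := O.getD p.1 []
          -- size2 = objdic[symbol_name][0]; if size == size2: append objdic[symbol_name][1]
          -- (pyGet? = none is IndexError, excluded by Pre_; .getD 0 keeps the port total)
          if p.2 = (PySem.List.pyGet? lst 0).getD 0 then
            acc ++ [(PySem.List.pyGet? lst 1).getD 0]
          else acc
        else acc) [])]) []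

-- ===== PORT B =====
def link_symbols_alt (main_dic : List (String × Int)) (objdic_vector : List (List (String × List Int))) : List (String × List Int) :=
  let M := PySem.Dict.ofList main_dic
  -- index = {}; for objdic in objdic_vector: for name, val in objdic.items():
  --   if name in main_dic: index.setdefault(name, []).append(val)
  let index := objdic_vector.foldl (fun idx objdic =>
    (PySem.Dict.ofList objdic).items.foldl
      (fun idx q => if M.contains q.1 then idx.modify q.1 [] (· ++ [q.2]) else idx) idx)
    PySem.Dict.empty
  -- {name: [val[1] for val in index.get(name, []) if val[0] == size] for name, size in main_dic.items()}
  M.items.map (fun p => (p.1,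
    (index.getD p.1 []).filterMap (fun val =>
      if (PySem.List.pyGet? val 0).getD 0 = p.2 then some ((PySem.List.pyGet? val 1).getD 0) else none)))

-- ===== PRECONDITION & SPEC =====
-- Pre_ excludes exactly the inputs where Python A raises IndexError: a symbol of main_dic whose
-- entry in some objdic is [] (so objdic[s][0] raises) or is a one-element list whose head equals
-- the symbol's size (so objdic[s][1] raises).
def Pre_link_symbols (main_dic : List (String × Int)) (objdic_vector : List (List (String × List Int))) : Prop :=
  ∀ objdic ∈ objdic_vector, ∀ q ∈ (PySem.Dict.ofList objdic).items,
    ∀ sz ∈ (PySem.Dict.ofList main_dic).get? q.1,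
      q.2 ≠ [] ∧ (PySem.List.pyGet? q.2 0 = some sz → 2 ≤ q.2.length)
instance (main_dic : List (String × Int)) (objdic_vector : List (List (String × List Int))) : Decidable (Pre_link_symbols main_dic objdic_vector) := by unfold Pre_link_symbols; infer_instance
def pvWitness_link_symbols : (List (String × Int)) × (List (List (String × List Int))) :=
  ([("a", 1), ("b", 2)], [[("a", [1, 5])], [("b", [3, 7]), ("c", [])]])
def Spec_link_symbols (main_dic : List (String × Int)) (objdic_vector : List (List (String × List Int))) (out : List (String × List Int)) : Prop := out = link_symbols_alt main_dic objdic_vector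
instance (main_dic : List (String × Int)) (objdic_vector : List (List (String × List Int))) (out : List (String × List Int)) : Decidable (Spec_link_symbols main_dic objdic_vector out) := by unfold Spec_link_symbols; infer_instance

-- ===== CLAIM (what is proved, stated in full; the proofs are below) =====
def Claim_equal_link_symbols : Prop := ∀ (main_dic : List (String × Int)) (objdic_vector : List (List (String × List Int))), Dom_link_symbols main_dic objdic_vector → Pre_link_symbols main_dic objdic_vector → Spec_link_symbols main_dic objdic_vector (link_symbols main_dic objdic_vector)

-- ===== LEMMAS AND PROOFS =====

-- a guarded foldl is a foldl over the filtered list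
theorem foldl_guard_filter {α β : Type} (c : α → Bool) (g : β → α → β) (l : List α) (b : β) :
    l.foldl (fun d q => if c q then g d q else d) b = (l.filter c).foldl g b := by
  induction l generalizing b with
  | nil => rfl
  | cons x xs ih =>
    by_cases h : c x = true <;> simp [List.filter, h, ih]

-- the per-symbol content of B's index: all entries for `name`, in objdic_vector order
theorem index_getD (main_dic : List (String × Int)) (ov : List (List (String × List Int)))
    (idx : PySem.Dict String (List (List Int))) (name : String)
    (hc : (PySem.Dict.ofList main_dic).contains name = true) :
    (ov.foldl (fun idx objdic =>
        (PySem.Dict.ofList objdic).items.foldl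
          (fun idx q => if (PySem.Dict.ofList main_dic).contains q.1 then idx.modify q.1 [] (· ++ [q.2]) else idx) idx) idx).getD name []
    = idx.getD name [] ++ ov.flatMap (fun objdic =>
        ((PySem.Dict.ofList objdic).items.filter (fun q => q.1 == name)).map (·.2)) := by
  induction ov generalizing idx with
  | nil => simp
  | cons objdic rest ih =>
    simp only [List.foldl_cons, List.flatMap_cons, ih]
    rw [foldl_guard_filter, PySem.Dict.getD_foldl_modify_append]
    have : ((PySem.Dict.ofList objdic).items.filter
              (fun q => (PySem.Dict.ofList main_dic).contains q.1)).filter (fun q => q.1 == name)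
         = (PySem.Dict.ofList objdic).items.filter (fun q => q.1 == name) := by
      rw [List.filter_filter]
      apply List.filter_congr
      intro q _
      by_cases h : q.1 = name
      · simp [h, hc]
      · simp [h]
    rw [← this, List.filter_filter, List.append_assoc]

-- in a list with unique keys, the entries at `name` are exactly the first-match lookup
theorem filter_key_nodup (l : List (String × List Int)) (name : String)
    (h : (l.map Prod.fst).Nodup) :
    (l.filter (fun q => q.1 == name)).map (·.2) = ((PySem.Dict.mk l).get? name).toList := by
  induction l with
  | nil => simp [PySem.Dict.get?]
  | cons x xs ih =>
    simp only [List.map_cons, List.nodup_cons] at h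
    rw [PySem.Dict.get?_mk_cons]
    by_cases hx : x.1 = name
    · have hnil : xs.filter (fun q => q.1 == name) = [] := by
        apply List.filter_eq_nil_iff.mpr
        intro q hq hb
        exact h.1 (by subst hx; rw [← eq_of_beq hb]; exact List.mem_map_of_mem hq)
      simp [List.filter, hx, hnil]
    · have hb : (x.1 == name) = false := beq_eq_false_iff_ne.mpr hx
      simp [List.filter, hb, ih h.2]

-- A's inner loop over objdic_vector equals B's filtered read-off of the per-symbol entries
theorem inner_eq (ov : List (List (String × List Int)))
    (name : String) (size : Int) (acc : List Int) :
    ov.foldl (fun acc objdic =>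
        let O := PySem.Dict.ofList objdic
        if O.contains name then
          let lst := O.getD name []
          if size = (PySem.List.pyGet? lst 0).getD 0 then
            acc ++ [(PySem.List.pyGet? lst 1).getD 0]
          else acc
        else acc) acc
    = acc ++ (ov.flatMap (fun objdic => ((PySem.Dict.ofList objdic).get? name).toList)).filterMap
        (fun val =>
          if (PySem.List.pyGet? val 0).getD 0 = size then some ((PySem.List.pyGet? val 1).getD 0) else none) := by
  induction ov generalizing acc with
  | nil => simp
  | cons objdic rest ih =>
    simp only [List.foldl_cons, List.flatMap_cons, List.filterMap_append]
    cases hg : (PySem.Dict.ofList objdic).get? name with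
    | none =>
      have hc : (PySem.Dict.ofList objdic).contains name = false := by
        rw [PySem.Dict.contains_eq_isSome_get?, hg]; rfl
      simp [hc, ih]
    | some lst =>
      have hc : (PySem.Dict.ofList objdic).contains name = true := by
        rw [PySem.Dict.contains_eq_isSome_get?, hg]; rfl
      have hd : (PySem.Dict.ofList objdic).getD name [] = lst :=
        PySem.Dict.getD_of_get?_eq_some _ _ hg
      by_cases hs : size = (PySem.List.pyGet? lst 0).getD 0
      · simp [hc, hd, ← hs, ih]
      · have hs' : ¬((PySem.List.pyGet? lst 0).getD 0 = size) := fun h => hs h.symm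
        simp [hc, hd, Option.toList, hs, hs', ih]

-- ===== VERDICT (by name: the statement is the Claim_ definition above) =====
theorem link_symbols_spec : Claim_equal_link_symbols := by
  intro main_dic ov _ _
  unfold Spec_link_symbols link_symbols link_symbols_alt
  rw [PySem.List.foldl_append_singleton_eq_map, List.nil_append]
  apply List.map_congr_left
  intro p hp
  have hc : (PySem.Dict.ofList main_dic).contains p.1 = true :=
    (PySem.Dict.contains_iff_mem_keys _ _).mpr (PySem.Dict.mem_keys_of_mem_items _ hp)
  simp only [Prod.mk.injEq, true_and]
  rw [inner_eq, List.nil_append, index_getD main_dic ov _ _ hc, PySem.Dict.getD_empty, List.nil_append]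
  congr 1
  congr 1
  funext objdic
  exact (filter_key_nodup _ _ (PySem.Dict.nodup_keys_ofList objdic)).symm
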